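-- pv_equiv track=rewrite | github.com/The-Marcy-Lab-School/longest_substring | longest_substring.py | get_nonrepeating_substrings
-- ===== SOURCE A (Python) =====
-- def get_nonrepeating_substrings(s: str) -> list[str]:
--     substrings = []
--     for i in range(len(s)):
--        chars = {}
--        for j in range(i, len(s)):
--            if s[j] in chars:
--                break
--            else:
--                substrings.append(s[i:j+1])
--                chars[s[j]] = True
--
--     return substrings
-- ===== SOURCE B (Python) =====
-- def get_nonrepeating_substrings(s: str) -> list[str]:
--     substrings = []
--     seen = set()
--     right = 0
--     n = len(s)
--     for i in range(n):
--         while right < n and s[right] not in seen: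
--             seen.add(s[right])
--             right += 1
--         substrings += [s[i:end] for end in range(i + 1, right + 1)]
--         seen.discard(s[i])
--     return substrings
-- ===== Notes on version B (the rewrite author's own statement) =====
-- stated objective: alternative
-- what changed: Replaces the per-start rescan with a fresh dict by a single sliding window: one character set and a right pointer that never moves backward; each start emits its slices up to the current window end and then removes its first character from the set.
import Mathlib
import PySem

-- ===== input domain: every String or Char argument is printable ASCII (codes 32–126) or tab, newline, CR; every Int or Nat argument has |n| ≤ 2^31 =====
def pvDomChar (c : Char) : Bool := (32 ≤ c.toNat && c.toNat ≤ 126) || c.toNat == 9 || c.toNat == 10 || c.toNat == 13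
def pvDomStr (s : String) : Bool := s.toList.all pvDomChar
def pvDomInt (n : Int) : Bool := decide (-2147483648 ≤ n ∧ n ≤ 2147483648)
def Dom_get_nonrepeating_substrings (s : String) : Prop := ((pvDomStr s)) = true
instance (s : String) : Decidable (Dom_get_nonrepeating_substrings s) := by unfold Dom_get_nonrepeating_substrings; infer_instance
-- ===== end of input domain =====

-- B replaces A's per-start rescan (a fresh dict per start index) by one sliding window whose
-- right pointer never moves backward; same return value, no speed claim (output size dominates).

-- ===== PORT A =====
-- inner 'for j in range(i, len(s))' loop with the dict `chars` and its break
def pvInnerA (cs : List Char) (i : Nat) (j : Nat) (chars : PySem.Dict Char Bool)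
    (acc : List String) : List String :=
  if h : j < cs.length then
    if chars.contains cs[j] then acc
    else pvInnerA cs i (j + 1) (chars.insert cs[j] true)
      (acc ++ [String.ofList (PySem.List.slice cs (some (i : Int)) (some ((j : Int) + 1)))])
  else acc
termination_by cs.length - j

def get_nonrepeating_substrings (s : String) : List String :=
  let cs := s.toList
  (List.range cs.length).foldl (fun acc i => pvInnerA cs i i PySem.Dict.empty acc) []

-- ===== PORT B =====
-- 'while right < n and s[right] not in seen: seen.add(s[right]); right += 1'
def pvAdvance (cs : List Char) (seen : PySem.Set Char) (r : Nat) : PySem.Set Char × Nat :=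
  if h : r < cs.length then
    if PySem.Set.contains seen cs[r] then (seen, r)
    else pvAdvance cs (PySem.Set.add seen cs[r]) (r + 1)
  else (seen, r)
termination_by cs.length - r

-- one body of B's 'for i in range(n)' loop: advance the window, emit the slices, drop s[i]
def pvStepB (cs : List Char) (st : List String × PySem.Set Char × Nat) (i : Nat) :
    List String × PySem.Set Char × Nat :=
  let ad := pvAdvance cs st.2.1 st.2.2
  (st.1 ++ (PySem.List.pyRange ((i : Int) + 1) ((ad.2 : Int) + 1) 1).map
      (fun e => String.ofList (PySem.List.slice cs (some (i : Int)) (some e))),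
   PySem.Set.discard ad.1 (cs.getD i ' '), ad.2)

def get_nonrepeating_substrings_alt (s : String) : List String :=
  let cs := s.toList
  ((List.range cs.length).foldl (pvStepB cs) ([], ([] : PySem.Set Char), 0)).1

-- ===== PRECONDITION & SPEC =====
def Spec_get_nonrepeating_substrings (s : String) (out : List String) : Prop := out = get_nonrepeating_substrings_alt s
instance (s : String) (out : List String) : Decidable (Spec_get_nonrepeating_substrings s out) := by unfold Spec_get_nonrepeating_substrings; infer_instance

-- ===== CLAIM (what is proved, stated in full; the proofs are below) =====
def Claim_equal_get_nonrepeating_substrings : Prop := ∀ (s : String), Dom_get_nonrepeating_substrings s → Spec_get_nonrepeating_substrings s (get_nonrepeating_substrings s)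

-- ===== LEMMAS AND PROOFS =====

-- length of the longest duplicate-free prefix of `t`, avoiding chars with `f c = true`
def pvDlen (f : Char → Bool) : List Char → Nat
  | [] => 0
  | c :: rest => if f c then 0 else pvDlen (fun x => x == c || f x) rest + 1

def pvL (cs : List Char) (i : Nat) : Nat := pvDlen (fun _ => false) (cs.drop i)

-- what both programs append for start index i
def pvEmit (cs : List Char) (i : Nat) : List String :=
  (List.range (pvL cs i)).map (fun k => String.ofList ((cs.drop i).take (k + 1)))

lemma pvDlen_congr (f g : Char → Bool) (t : List Char) (h : ∀ c, f c = g c) :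
    pvDlen f t = pvDlen g t := by
  induction t generalizing f g with
  | nil => rfl
  | cons c rest ih =>
      simp only [pvDlen, h c]
      split
      · rfl
      · exact congrArg (· + 1) (ih _ _ (fun x => by rw [h x]))

lemma pvDlen_le_length (f : Char → Bool) (t : List Char) : pvDlen f t ≤ t.length := by
  induction t generalizing f with
  | nil => simp [pvDlen]
  | cons c rest ih =>
      simp only [pvDlen, List.length_cons]
      split
      · omega
      · have := ih (fun x => x == c || f x); omega

lemma pvDlen_append (p t : List Char) (f : Char → Bool)
    (hnd : p.Nodup) (hd : ∀ c ∈ p, f c = false) :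
    pvDlen f (p ++ t) = p.length + pvDlen (fun x => decide (x ∈ p) || f x) t := by
  induction p generalizing f with
  | nil =>
      simp only [List.nil_append, List.length_nil, Nat.zero_add]
      apply pvDlen_congr
      intro c
      simp
  | cons c p' ih =>
      have hc : f c = false := hd c (by simp)
      have hnd' : p'.Nodup := hnd.of_cons
      have hcp : c ∉ p' := (List.nodup_cons.mp hnd).1
      simp only [List.cons_append, pvDlen, hc, Bool.false_eq_true, if_false]
      rw [ih _ hnd' (fun x hx => by
        have hfx : f x = false := hd x (by simp [hx])
        have hxc : (x == c) = false := beq_eq_false_iff_ne.mpr (fun h => hcp (h ▸ hx))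
        simp [hfx, hxc])]
      rw [pvDlen_congr _ (fun x => decide (x ∈ c :: p') || f x) t (fun x => by
        by_cases hx : x = c
        · simp [hx]
        · have hxc : (x == c) = false := beq_eq_false_iff_ne.mpr hx
          simp [hx, hxc])]
      simp [List.length_cons]; omega

-- the longest duplicate-free prefix is itself duplicate-free and disjoint from `f`
lemma pvDlen_take_nodup (t : List Char) (f : Char → Bool) :
    (t.take (pvDlen f t)).Nodup ∧ ∀ c ∈ t.take (pvDlen f t), f c = false := by
  induction t generalizing f with
  | nil => simp
  | cons c rest ih =>
      simp only [pvDlen]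
      split
      · simp
      · next hfc =>
        obtain ⟨h1, h2⟩ := ih (fun x => x == c || f x)
        rw [List.take_succ_cons]
        constructor
        · refine List.nodup_cons.mpr ⟨fun hmem => ?_, h1⟩
          have := h2 c hmem; simp at this
        · intro x hx
          rcases List.mem_cons.mp hx with rfl | hx
          · simpa using hfc
          · have := h2 x hx; simp at this; exact this.2

-- A's inner loop emits the slices s[i:j+1] … s[i:j+dlen] in order
lemma pvInnerA_eq (cs : List Char) (i : Nat) :
    ∀ (m j : Nat) (chars : PySem.Dict Char Bool) (acc : List String),
      cs.length - j ≤ m → i ≤ j →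
      pvInnerA cs i j chars acc =
        acc ++ (List.range (pvDlen chars.contains (cs.drop j))).map
          (fun k => String.ofList ((cs.drop i).take (j - i + k + 1))) := by
  intro m
  induction m with
  | zero =>
      intro j chars acc hm hij
      have hj : cs.length ≤ j := by omega
      rw [pvInnerA]
      simp [Nat.not_lt.mpr hj, List.drop_eq_nil_of_le hj, pvDlen]
  | succ m ih =>
      intro j chars acc hm hij
      rw [pvInnerA]
      by_cases hj : j < cs.length
      · have hdrop : cs.drop j = cs[j] :: cs.drop (j + 1) :=
          (List.drop_eq_getElem_cons hj)
        rw [dif_pos hj]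
        by_cases hcc : chars.contains cs[j]
        · rw [if_pos hcc]
          rw [hdrop]
          simp [pvDlen, hcc]
        · rw [if_neg hcc]
          rw [ih (j + 1) _ _ (by omega) (by omega)]
          rw [hdrop]
          have hcc' : chars.contains cs[j] = false := by simpa using hcc
          simp only [pvDlen, hcc', Bool.false_eq_true, if_false]
          rw [pvDlen_congr (PySem.Dict.contains (chars.insert cs[j] true))
                (fun x => x == cs[j] || chars.contains x) _
                (fun x => PySem.Dict.contains_insert chars cs[j] x true)]
          rw [List.range_succ_eq_map, List.map_cons, List.map_map]
          rw [List.append_assoc]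
          congr 1
          rw [List.singleton_append]
          congr 1
          · have : (i : Int) + 1 = ((i + 1 : Nat) : Int) := by push_cast; ring
            have hji : (j : Int) + 1 = ((j + 1 : Nat) : Int) := by push_cast; ring
            rw [hji, PySem.List.slice_natCast]
            congr 2
            omega
          · apply List.map_congr_left
            intro k _
            simp only [Function.comp]
            congr 2
            omega
      · rw [dif_neg hj]
        have hj' : cs.length ≤ j := by omega
        simp [List.drop_eq_nil_of_le hj', pvDlen]

lemma pvFoldA (cs : List Char) (l : List Nat) (acc : List String) :
    l.foldl (fun acc i => pvInnerA cs i i PySem.Dict.empty acc) acc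
      = acc ++ l.flatMap (pvEmit cs) := by
  induction l generalizing acc with
  | nil => simp
  | cons i l ih =>
      simp only [List.foldl_cons, List.flatMap_cons]
      rw [ih, pvInnerA_eq cs i (cs.length - i) i PySem.Dict.empty acc (by omega) (le_refl i)]
      rw [List.append_assoc]
      congr 2
      rw [pvDlen_congr (PySem.Dict.contains PySem.Dict.empty) (fun _ => false) _
        (fun x => rfl)]
      unfold pvEmit pvL
      apply List.map_congr_left
      intro k _
      congr 2
      omega

-- B's while-loop reaches r + dlen(seen, rest) and seen gains exactly the traversed chars
lemma pvAdvance_eq (cs : List Char) :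
    ∀ (m r : Nat) (seen : PySem.Set Char), cs.length - r ≤ m →
      (pvAdvance cs seen r).2 = r + pvDlen (PySem.Set.contains seen) (cs.drop r) ∧
      ∀ c, PySem.Set.contains (pvAdvance cs seen r).1 c =
        (PySem.Set.contains seen c ||
          decide (c ∈ (cs.drop r).take (pvDlen (PySem.Set.contains seen) (cs.drop r)))) := by
  intro m
  induction m with
  | zero =>
      intro r seen hm
      have hr : cs.length ≤ r := by omega
      rw [pvAdvance]
      simp [Nat.not_lt.mpr hr, List.drop_eq_nil_of_le hr, pvDlen]
  | succ m ih =>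
      intro r seen hm
      rw [pvAdvance]
      by_cases hr : r < cs.length
      · have hdrop : cs.drop r = cs[r] :: cs.drop (r + 1) := List.drop_eq_getElem_cons hr
        rw [dif_pos hr]
        by_cases hc : PySem.Set.contains seen cs[r]
        · rw [if_pos hc]
          have h0 : pvDlen (PySem.Set.contains seen) (cs.drop r) = 0 := by
            rw [hdrop]; simp only [pvDlen, hc, if_true]
          rw [h0]
          simp
        · rw [if_neg hc]
          obtain ⟨h1, h2⟩ := ih (r + 1) (PySem.Set.add seen cs[r]) (by omega)
          have hca : ∀ x, PySem.Set.contains (PySem.Set.add seen cs[r]) x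
              = (x == cs[r] || PySem.Set.contains seen x) := by
            intro x
            rw [Bool.eq_iff_iff]
            simp [PySem.Set.mem_add, or_comm]
          have hc' : PySem.Set.contains seen cs[r] = false := by simpa using hc
          have hdl : pvDlen (PySem.Set.contains seen) (cs.drop r)
              = pvDlen (PySem.Set.contains (PySem.Set.add seen cs[r])) (cs.drop (r + 1)) + 1 := by
            rw [hdrop]
            simp only [pvDlen, hc', Bool.false_eq_true, if_false]
            rw [pvDlen_congr _ _ _ hca]
          constructor
          · rw [h1, hdl]; omega
          · intro c
            rw [h2 c, hca c, hdl, hdrop, List.take_succ_cons]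
            by_cases hcr : c = cs[r]
            · simp [hcr]
            · have hcrb : (c == cs[r]) = false := beq_eq_false_iff_ne.mpr hcr
              simp [hcr, hcrb]
      · rw [dif_neg hr]
        have hr' : cs.length ≤ r := by omega
        simp [List.drop_eq_nil_of_le hr', pvDlen]

-- invariant of B's main loop: window (cs.drop i).take (r-i) is duplicate-free, seen = its chars
lemma pvFoldB (cs : List Char) :
    ∀ (m i : Nat) (acc : List String) (seen : PySem.Set Char) (r : Nat),
      i + m = cs.length → i ≤ r → r ≤ cs.length →
      ((cs.drop i).take (r - i)).Nodup →
      (∀ c, PySem.Set.contains seen c = decide (c ∈ (cs.drop i).take (r - i))) →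
      ((List.range' i m).foldl (pvStepB cs) (acc, seen, r)).1
        = acc ++ (List.range' i m).flatMap (pvEmit cs) := by
  intro m
  induction m with
  | zero => intro i acc seen r _ _ _ _ _; simp
  | succ m ih =>
      intro i acc seen r hlen hir hrle hnd hseen
      have hi : i < cs.length := by omega
      have hidrop : cs.drop i = cs[i] :: cs.drop (i + 1) := List.drop_eq_getElem_cons hi
      -- the window and the split of cs.drop i
      set w : List Char := (cs.drop i).take (r - i) with hw
      have hsplit : cs.drop i = w ++ cs.drop r := by
        rw [hw]
        conv_lhs => rw [← List.take_append_drop (r - i) (cs.drop i)]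
        rw [List.drop_drop, show i + (r - i) = r by omega]
      have hwlen : w.length = r - i := by
        rw [hw, List.length_take, List.length_drop]
        omega
      -- dlen seen = dlen (mem w)
      have hdc : pvDlen (PySem.Set.contains seen) (cs.drop r)
          = pvDlen (fun x => decide (x ∈ w)) (cs.drop r) :=
        pvDlen_congr _ _ _ (fun c => by rw [hseen c])
      obtain ⟨hadv2, hadv1⟩ := pvAdvance_eq cs (cs.length - r) r seen (le_refl _)
      set d : Nat := pvDlen (PySem.Set.contains seen) (cs.drop r) with hd
      set r' : Nat := (pvAdvance cs seen r).2 with hr'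
      have hrr' : r' = r + d := hadv2
      -- r' = i + pvL cs i
      have hdw : pvDlen (fun x => decide (x ∈ w) || false) (cs.drop r)
          = pvDlen (PySem.Set.contains seen) (cs.drop r) :=
        pvDlen_congr _ _ _ (fun c => by rw [hseen c, Bool.or_false])
      have hL : pvL cs i = (r - i) + d := by
        unfold pvL
        rw [hsplit, pvDlen_append w (cs.drop r) _ hnd (fun c _ => rfl)]
        rw [hwlen, hdw]
      have hrL : r' = i + pvL cs i := by omega
      have hdle : d ≤ cs.length - r := by
        have := pvDlen_le_length (PySem.Set.contains seen) (cs.drop r)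
        rw [List.length_drop] at this
        omega
      have hr'le : r' ≤ cs.length := by omega
      -- the new window at i+1
      have hLpos : 1 ≤ pvL cs i := by
        unfold pvL
        rw [hidrop]
        simp [pvDlen]
      have hir' : i + 1 ≤ r' := by omega
      -- window' at r' is the full duplicate-free prefix take (pvL cs i)
      have hwin' : (cs.drop i).take (r' - i) = (cs.drop i).take (pvL cs i) := by
        rw [hrL]; congr 1; omega
      have hnodup' : ((cs.drop i).take (r' - i)).Nodup := by
        rw [hwin']
        exact (pvDlen_take_nodup (cs.drop i) (fun _ => false)).1
      -- seen after advance = chars of window at [i, r')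
      have hseen2 : ∀ c, PySem.Set.contains (pvAdvance cs seen r).1 c
          = decide (c ∈ (cs.drop i).take (r' - i)) := by
        intro c
        rw [hadv1 c, hseen c]
        have : (cs.drop i).take (r' - i) = w ++ (cs.drop r).take d := by
          have h1 : r' - i = (r - i) + d := by omega
          rw [h1, List.take_add, ← hw]
          congr 2
          rw [List.drop_drop, show i + (r - i) = r by omega]
        rw [this]
        simp
      -- the head of the window is cs[i], not repeated in the tail window
      have hwin_cons : (cs.drop i).take (r' - i) = cs[i] :: (cs.drop (i + 1)).take (r' - (i + 1)) := by
        rw [hidrop]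
        have : r' - i = (r' - (i + 1)) + 1 := by omega
        rw [this, List.take_succ_cons]
      have hnotmem : cs[i] ∉ (cs.drop (i + 1)).take (r' - (i + 1)) := by
        have := hnodup'
        rw [hwin_cons] at this
        exact (List.nodup_cons.mp this).1
      have hnodup'' : ((cs.drop (i + 1)).take (r' - (i + 1))).Nodup := by
        have := hnodup'
        rw [hwin_cons] at this
        exact this.of_cons
      -- membership of seen after discard
      have hseen3 : ∀ c, PySem.Set.contains (PySem.Set.discard (pvAdvance cs seen r).1 (cs.getD i ' ')) c
          = decide (c ∈ (cs.drop (i + 1)).take (r' - (i + 1))) := by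
        intro c
        have hget : cs.getD i ' ' = cs[i] := List.getD_eq_getElem cs ' ' hi
        rw [hget, Bool.eq_iff_iff]
        simp only [PySem.Set.contains_iff, PySem.Set.mem_discard, decide_eq_true_eq]
        rw [← PySem.Set.contains_iff, hseen2 c, decide_eq_true_eq, hwin_cons]
        constructor
        · rintro ⟨hc, hne⟩
          rcases List.mem_cons.mp hc with rfl | h
          · exact absurd rfl hne
          · exact h
        · intro h
          exact ⟨List.mem_cons_of_mem _ h, fun heq => hnotmem (heq ▸ h)⟩
      -- the emitted batch equals pvEmit cs i
      have hemit : (PySem.List.pyRange ((i : Int) + 1) (((pvAdvance cs seen r).2 : Int) + 1) 1).map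
            (fun e => String.ofList (PySem.List.slice cs (some (i : Int)) (some e)))
          = pvEmit cs i := by
        rw [← hr', PySem.List.pyRange_one, List.map_map]
        unfold pvEmit
        have hcount : (((r' : Int) + 1) - ((i : Int) + 1)).toNat = pvL cs i := by
          rw [hrL]; omega
        rw [hcount]
        apply List.map_congr_left
        intro k _
        simp only [Function.comp]
        have hcast : (i : Int) + 1 + (k : Int) = ((i + k + 1 : Nat) : Int) := by push_cast; ring
        rw [hcast, PySem.List.slice_natCast]
        congr 2
        omega
      -- one step, then the induction hypothesis
      rw [List.range'_succ, List.foldl_cons]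
      show ((List.range' (i+1) m).foldl (pvStepB cs) (pvStepB cs (acc, seen, r) (i))).1 = _
      have hstep : pvStepB cs (acc, seen, r) i
          = (acc ++ pvEmit cs i,
             PySem.Set.discard (pvAdvance cs seen r).1 (cs.getD i ' '), r') := by
        unfold pvStepB
        simp only []
        rw [hemit, hr']
      rw [hstep,
        ih (i + 1) (acc ++ pvEmit cs i) _ r' (by omega) hir' hr'le hnodup'' hseen3]
      simp [List.flatMap_cons, List.append_assoc]

-- ===== VERDICT (by name: the statement is the Claim_ definition above) =====
theorem get_nonrepeating_substrings_spec : Claim_equal_get_nonrepeating_substrings := by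
  intro s _
  unfold Spec_get_nonrepeating_substrings
  unfold get_nonrepeating_substrings get_nonrepeating_substrings_alt
  simp only []
  rw [pvFoldA s.toList (List.range s.toList.length) []]
  rw [List.range_eq_range']
  have hB := pvFoldB s.toList s.toList.length 0 [] [] 0 (by omega) (by omega) (by omega)
      (by simp) (by intro c; simp [PySem.Set.contains])
  rw [hB]
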